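-- pv_equiv track=rewrite | github.com/MrBrantCode/unitest_baseline | mut_generate/mist_train_cf/cf_97311/solution.py | get_first_last_unique_chars
-- ===== SOURCE A (Python) =====
-- def get_first_last_unique_chars(string):
--     # Remove special characters, numbers, and uppercase letters
--     string = ''.join(ch.lower() for ch in string if ch.isalpha())
--
--     # Find the first and last occurring unique characters
--     first_unique = ''
--     last_unique = ''
--     for ch in string:
--         if string.count(ch) == 1:
--             if not first_unique:
--                 first_unique = ch
--             last_unique = ch
--
--     # Sort and return the first and last unique characters
--     return ''.join(sorted([first_unique, last_unique]))
-- ===== SOURCE B (Python) =====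
-- def get_first_last_unique_chars(string):
--     cleaned = ''.join(ch.lower() for ch in string if ch.isalpha())
--     # Scan the fixed alphabet instead of the string: for each letter that occurs
--     # exactly once, locate its single position; keep the positional argmin/argmax.
--     best_first = None  # (position, letter) with smallest position
--     best_last = None   # (position, letter) with largest position
--     for letter in 'abcdefghijklmnopqrstuvwxyz':
--         if cleaned.count(letter) == 1:
--             pos = cleaned.index(letter)
--             if best_first is None or pos < best_first[0]:
--                 best_first = (pos, letter)
--             if best_last is None or pos > best_last[0]:
--                 best_last = (pos, letter)
--     first = best_first[1] if best_first is not None else ''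
--     last = best_last[1] if best_last is not None else ''
--     return ''.join(sorted([first, last]))
-- ===== Notes on version B (the rewrite author's own statement) =====
-- stated objective: faster
-- what changed: A scans the cleaned string once, calling string.count per character and maintaining running first/last; B instead iterates over the fixed 26-letter alphabet, locates the unique position of each singly-occurring letter with one count/index per letter, and keeps the positional argmin/argmax.
import Mathlib
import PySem

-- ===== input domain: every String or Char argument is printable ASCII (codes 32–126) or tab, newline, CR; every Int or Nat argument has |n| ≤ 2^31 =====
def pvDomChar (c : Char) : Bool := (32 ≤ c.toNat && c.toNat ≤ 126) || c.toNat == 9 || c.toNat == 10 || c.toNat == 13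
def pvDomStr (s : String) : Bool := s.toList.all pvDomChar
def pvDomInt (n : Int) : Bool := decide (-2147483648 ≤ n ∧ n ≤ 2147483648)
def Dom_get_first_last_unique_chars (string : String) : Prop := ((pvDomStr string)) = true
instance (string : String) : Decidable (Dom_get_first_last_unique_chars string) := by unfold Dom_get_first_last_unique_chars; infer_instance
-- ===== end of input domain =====

-- B replaces A's single scan of the string (string.count per character, running first/last)
-- by a scan of the 26-letter alphabet: for each letter occurring exactly once it locates the
-- letter's unique position and keeps the positional argmin/argmax.

-- ===== PORT A =====
def get_first_last_unique_chars (string : String) : String :=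
  -- string = ''.join(ch.lower() for ch in string if ch.isalpha())
  let cleaned : List Char := (string.toList.filter PySem.Chars.isalpha).map PySem.Chars.lowerChar
  -- loop maintaining first_unique / last_unique
  let fl : String × String := cleaned.foldl
    (fun q ch =>
      if PySem.List.count cleaned ch == 1 then
        ((if q.1 = "" then String.ofList [ch] else q.1), String.ofList [ch])
      else q) ("", "")
  PySem.Str.join "" (PySem.List.sorted [fl.1, fl.2] (fun x => x) false)

-- ===== PORT B =====
-- the alphabet literal B iterates over
def pyLowerAlphabet : List Char := "abcdefghijklmnopqrstuvwxyz".toList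

def get_first_last_unique_chars_alt (string : String) : String :=
  let cleaned : List Char := (string.toList.filter PySem.Chars.isalpha).map PySem.Chars.lowerChar
  -- for letter in 'abcdefghijklmnopqrstuvwxyz': … keep positional argmin/argmax
  let bf : Option (Nat × Char) × Option (Nat × Char) := pyLowerAlphabet.foldl
    (fun st letter =>
      if PySem.List.count cleaned letter == 1 then
        match PySem.List.index? cleaned letter with   -- pos = cleaned.index(letter); some, since count = 1
        | some pos =>
            ((match st.1 with
              | none => some (pos, letter)
              | some q => if pos < q.1 then some (pos, letter) else some q),
             (match st.2 with
              | none => some (pos, letter)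
              | some q => if pos > q.1 then some (pos, letter) else some q))
        | none => st
      else st) (none, none)
  let first : String := match bf.1 with | some q => String.ofList [q.2] | none => ""
  let last : String := match bf.2 with | some q => String.ofList [q.2] | none => ""
  PySem.Str.join "" (PySem.List.sorted [first, last] (fun x => x) false)

-- ===== PRECONDITION & SPEC =====
def Spec_get_first_last_unique_chars (string : String) (out : String) : Prop := out = get_first_last_unique_chars_alt string
instance (string : String) (out : String) : Decidable (Spec_get_first_last_unique_chars string out) := by unfold Spec_get_first_last_unique_chars; infer_instance

-- ===== CLAIM (what is proved, stated in full; the proofs are below) =====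
def Claim_equal_get_first_last_unique_chars : Prop := ∀ (string : String), Dom_get_first_last_unique_chars string → Spec_get_first_last_unique_chars string (get_first_last_unique_chars string)

-- ===== LEMMAS AND PROOFS =====

-- A's loop computes the head / last of the filtered list.
theorem loopA (p : Char → Bool) (l : List Char) (f la : String) :
    l.foldl
      (fun q ch =>
        if p ch then ((if q.1 = "" then String.ofList [ch] else q.1), String.ofList [ch]) else q)
      (f, la)
    = ((if f = "" then (match (l.filter p).head? with | some c => String.ofList [c] | none => "") else f),
       (match (l.filter p).getLast? with | some c => String.ofList [c] | none => la)) := by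
  induction l generalizing f la with
  | nil => simp
  | cons ch t ih =>
    rw [List.foldl_cons]
    by_cases hp : p ch = true
    · rw [if_pos hp, List.filter_cons_of_pos hp, ih]
      have hne : String.ofList [ch] ≠ "" := by simp [String.ext_iff]
      refine Prod.ext ?_ ?_
      · by_cases hf : f = ""
        · simp [hf, hne]
        · simp [hf]
      · rcases h : (t.filter p).getLast? with _ | c
        · simp [List.getLast?_cons, h]
        · have h2 : (ch :: t.filter p).getLast? = some c := by
            rw [List.getLast?_cons]; simp [h]
          simp [h2]
    · rw [if_neg hp, List.filter_cons_of_neg (by simp [hp])]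
      exact ih f la

-- two positions of the same character force count ≥ 2
theorem two_le_count (l : List Char) (c : Char) (i j : Nat) (hi : i < l.length) (hj : j < l.length)
    (hci : l[i] = c) (hcj : l[j] = c) (hne : i ≠ j) : 2 ≤ l.count c := by
  rw [← List.duplicate_iff_two_le_count, List.duplicate_iff_exists_distinct_get]
  rcases Nat.lt_or_ge i j with h | h
  · exact ⟨⟨i, hi⟩, ⟨j, hj⟩, by simpa using h, by simpa using hci.symm, by simpa using hcj.symm⟩
  · exact ⟨⟨j, hj⟩, ⟨i, hi⟩, by simpa using lt_of_le_of_ne h (Ne.symm hne), by simpa using hcj.symm, by simpa using hci.symm⟩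

-- idxOf is minimal among positions holding c
theorem idxOf_le_of_getElem (l : List Char) (c : Char) (j : Nat) (hl : j < l.length)
    (hc : l[j] = c) : l.idxOf c ≤ j := by
  by_contra h
  have h2 : j < l.findIdx (· == c) := by simpa [List.idxOf] using Nat.lt_of_not_le h
  have := List.not_of_lt_findIdx h2 (xs := l)
  simp at this
  exact this hc

-- a count-1 character at position i has idxOf = i
theorem idxOf_eq_of_count_one (l : List Char) (c : Char) (i : Nat) (hi : i < l.length)
    (hc : l[i] = c) (h1 : l.count c = 1) : l.idxOf c = i := by
  have hmem : c ∈ l := hc ▸ List.getElem_mem hi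
  have hlt := List.idxOf_lt_length_of_mem hmem
  have hget : l[l.idxOf c] = c := List.getElem_idxOf hlt
  by_contra hne
  have := two_le_count l c (l.idxOf c) i hlt hi hget hc hne
  omega

-- idxOf? of a member
theorem idxOf?_mem (l : List Char) (c : Char) (h : c ∈ l) :
    List.idxOf? c l = some (l.idxOf c) := by
  have hlt := List.idxOf_lt_length_of_mem h
  rw [List.idxOf?_eq_some_iff]
  refine ⟨hlt, List.getElem_idxOf _, fun j hj hc => ?_⟩
  have := idxOf_le_of_getElem l c j (Nat.lt_trans hj hlt) hc
  omega

-- B's fold over a candidate list is argmin/argmax of fst over the (position, letter) pairs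
theorem foldB (l : List Char) (cs : List Char) (o₁ o₂ : Option (Nat × Char)) :
    cs.foldl
      (fun st letter =>
        if PySem.List.count l letter == 1 then
          match PySem.List.index? l letter with
          | some pos =>
              ((match st.1 with
                | none => some (pos, letter)
                | some q => if pos < q.1 then some (pos, letter) else some q),
               (match st.2 with
                | none => some (pos, letter)
                | some q => if pos > q.1 then some (pos, letter) else some q))
          | none => st
        else st) (o₁, o₂)
    = (((cs.filter (fun c => l.count c == 1)).map (fun c => (l.idxOf c, c))).foldl
         (List.argAux fun b c => b.1 < c.1) o₁,
       ((cs.filter (fun c => l.count c == 1)).map (fun c => (l.idxOf c, c))).foldl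
         (List.argAux fun b c => c.1 < b.1) o₂) := by
  induction cs generalizing o₁ o₂ with
  | nil => rfl
  | cons c cs ih =>
    rw [List.foldl_cons]
    by_cases hp : l.count c = 1
    · have hmem : c ∈ l := List.count_pos_iff.mp (by omega)
      rw [PySem.List.count_eq, PySem.List.index?_eq_idxOf?, idxOf?_mem l c hmem]
      simp only [hp, beq_self_eq_true, if_pos]
      rw [List.filter_cons_of_pos (by simp [hp]), List.map_cons, List.foldl_cons, List.foldl_cons, ih]
      have hmin : ∀ (o : Option (Nat × Char)) (pos : Nat) (letter : Char),
          (match o with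
            | none => some (pos, letter)
            | some q => if pos < q.1 then some (pos, letter) else some q)
          = List.argAux (fun b c => b.1 < c.1) o (pos, letter) := by
        intro o pos letter; cases o <;> rfl
      have hmax : ∀ (o : Option (Nat × Char)) (pos : Nat) (letter : Char),
          (match o with
            | none => some (pos, letter)
            | some q => if pos > q.1 then some (pos, letter) else some q)
          = List.argAux (fun b c => c.1 < b.1) o (pos, letter) := by
        intro o pos letter; cases o <;> rfl
      rw [hmin, hmax]
    · rw [PySem.List.count_eq]
      have : (l.count c == 1) = false := by simpa using hp
      rw [this]
      simp only [Bool.false_eq_true, if_neg, not_false_iff]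
      rw [List.filter_cons_of_neg (by simpa using hp), ih]

-- pairwise strict keys make members with equal keys equal
theorem eq_of_mem_of_key_eq (qs : List (Nat × Char)) (hpw : qs.Pairwise (fun a b => a.1 < b.1))
    (m h : Nat × Char) (hm : m ∈ qs) (hh : h ∈ qs) (hk : m.1 = h.1) : m = h := by
  induction qs with
  | nil => cases hm
  | cons q t ih =>
    rcases List.pairwise_cons.mp hpw with ⟨hq, ht⟩
    rcases List.mem_cons.mp hm with rfl | hm'
    · rcases List.mem_cons.mp hh with rfl | hh'
      · rfl
      · exact absurd hk (by have := hq h hh'; omega)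
    · rcases List.mem_cons.mp hh with rfl | hh'
      · exact absurd hk (by have := hq m hm'; omega)
      · exact ih ht hm' hh'

-- membership characterisation used to identify the two pair lists
theorem mem_pairs (l cs : List Char) (q : Nat × Char) :
    q ∈ (cs.filter (fun c => l.count c == 1)).map (fun c => (l.idxOf c, c)) ↔
      ∃ c, c ∈ cs ∧ l.count c = 1 ∧ q = (l.idxOf c, c) := by
  simp [List.mem_filter]
  constructor
  · rintro ⟨c, ⟨hc, h1⟩, rfl⟩; exact ⟨c, hc, h1, rfl⟩
  · rintro ⟨c, hc, h1, rfl⟩; exact ⟨c, ⟨hc, h1⟩, rfl⟩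

-- membership in the alphabet from numeric bounds
theorem mem_alpha_ofNat (n : Nat) (h1 : 97 ≤ n) (h2 : n ≤ 122) : Char.ofNat n ∈ pyLowerAlphabet := by
  interval_cases n <;> decide

-- lowering an ASCII letter lands in the alphabet
theorem lower_mem (ch : Char) (ha : PySem.Chars.isalpha ch = true) :
    PySem.Chars.lowerChar ch ∈ pyLowerAlphabet := by
  rcases Bool.or_eq_true_iff.mp (by simpa [PySem.Chars.isalpha] using ha) with hu | hlo
  · have hb : 65 ≤ ch.toNat ∧ ch.toNat ≤ 90 := by
      simp [PySem.Chars.isupper, Char.le_def, UInt32.le_iff_toNat_le] at hu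
      exact hu
    simp [PySem.Chars.lowerChar, hu]
    exact mem_alpha_ofNat _ (by omega) (by omega)
  · have hb : 97 ≤ ch.toNat ∧ ch.toNat ≤ 122 := by
      simp [PySem.Chars.islower, Char.le_def, UInt32.le_iff_toNat_le] at hlo
      exact hlo
    have hu : PySem.Chars.isupper ch = false := by
      simp [PySem.Chars.isupper, Char.le_def, UInt32.le_iff_toNat_le]
      omega
    rw [PySem.Chars.lowerChar, hu]
    simp
    rw [← Char.ofNat_toNat ch]
    exact mem_alpha_ofNat _ (by omega) (by omega)

-- every character of the cleaned string is a lowercase ASCII letter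
theorem cleaned_mem_alphabet (s : String) (c : Char)
    (hc : c ∈ (s.toList.filter PySem.Chars.isalpha).map PySem.Chars.lowerChar) :
    c ∈ pyLowerAlphabet := by
  rcases List.mem_map.mp hc with ⟨ch, hch, rfl⟩
  exact lower_mem ch (List.mem_filter.mp hch).2

-- the filtered list U, mapped through (idxOf, id), has strictly increasing keys
theorem U_pairwise (l : List Char) :
    ((l.filter (fun c => l.count c == 1)).map (fun c => (l.idxOf c, c))).Pairwise
      (fun a b => a.1 < b.1) := by
  rw [List.pairwise_map]
  have hsub : (l.filter (fun c => l.count c == 1)).Sublist l := List.filter_sublist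
  obtain ⟨is, heq, hpw⟩ := List.sublist_eq_map_getElem hsub
  rw [heq, List.pairwise_map]
  refine hpw.imp_of_mem ?_
  intro i j hi hj hlt
  have hmemi : l[i] ∈ l.filter (fun c => l.count c == 1) := by
    rw [heq]; exact List.mem_map.mpr ⟨i, hi, rfl⟩
  have hmemj : l[j] ∈ l.filter (fun c => l.count c == 1) := by
    rw [heq]; exact List.mem_map.mpr ⟨j, hj, rfl⟩
  have hci : l.count l[i] = 1 := by simpa using (List.mem_filter.mp hmemi).2
  have hcj : l.count l[j] = 1 := by simpa using (List.mem_filter.mp hmemj).2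
  rw [idxOf_eq_of_count_one l l[i] i i.isLt rfl hci, idxOf_eq_of_count_one l l[j] j j.isLt rfl hcj]
  exact hlt

-- the two pair lists have the same members when every char of l lies in the alphabet
theorem mem_ps_iff (l : List Char) (hcov : ∀ c ∈ l, c ∈ pyLowerAlphabet) (q : Nat × Char) :
    (q ∈ (pyLowerAlphabet.filter (fun c => l.count c == 1)).map (fun c => (l.idxOf c, c))) ↔
      q ∈ (l.filter (fun c => l.count c == 1)).map (fun c => (l.idxOf c, c)) := by
  rw [mem_pairs, mem_pairs]
  constructor
  · rintro ⟨c, _, h1, rfl⟩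
    exact ⟨c, List.count_pos_iff.mp (by omega), h1, rfl⟩
  · rintro ⟨c, hc, h1, rfl⟩
    exact ⟨c, hcov c hc, h1, rfl⟩

-- the head of a key-increasing list has the minimal key
theorem head_min (qs : List (Nat × Char)) (hpw : qs.Pairwise (fun a b => a.1 < b.1))
    (h : Nat × Char) (hh : qs.head? = some h) : ∀ a ∈ qs, h.1 ≤ a.1 := by
  cases qs with
  | nil => cases hh
  | cons x t =>
    cases hh
    intro a ha
    rcases List.mem_cons.mp ha with rfl | ha'
    · exact le_refl _
    · exact le_of_lt (List.rel_of_pairwise_cons hpw ha')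

-- the last element of a key-increasing list has the maximal key
theorem last_max (qs : List (Nat × Char)) (hpw : qs.Pairwise (fun a b => a.1 < b.1))
    (g : Nat × Char) (hg : qs.getLast? = some g) : ∀ a ∈ qs, a.1 ≤ g.1 := by
  have h1 : qs.reverse.head? = some g := by rw [← List.getLast?_eq_head?_reverse]; exact hg
  have hpw' : qs.reverse.Pairwise (fun a b => b.1 < a.1) := List.pairwise_reverse.mpr hpw
  intro a ha
  have ha' : a ∈ qs.reverse := List.mem_reverse.mpr ha
  cases hqr : qs.reverse with
  | nil => rw [hqr] at ha'; cases ha'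
  | cons x t =>
    rw [hqr] at h1 ha' hpw'
    cases h1
    rcases List.mem_cons.mp ha' with rfl | ha''
    · exact le_refl _
    · exact le_of_lt (List.rel_of_pairwise_cons hpw' ha'')

-- main equality
theorem get_first_last_unique_chars_eq (s : String) (_hdom : Dom_get_first_last_unique_chars s) :
    get_first_last_unique_chars s = get_first_last_unique_chars_alt s := by
  unfold get_first_last_unique_chars get_first_last_unique_chars_alt
  dsimp only
  set l : List Char := (s.toList.filter PySem.Chars.isalpha).map PySem.Chars.lowerChar with hldef
  have hcov : ∀ c ∈ l, c ∈ pyLowerAlphabet := fun c hc => cleaned_mem_alphabet s c (hldef ▸ hc)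
  rw [loopA (fun ch => PySem.List.count l ch == 1) l "" "", foldB l pyLowerAlphabet none none]
  have hpred : (fun ch => PySem.List.count l ch == 1) = (fun c => l.count c == 1) := by
    funext c; rw [PySem.List.count_eq]
  rw [hpred]
  set U := l.filter (fun c => l.count c == 1) with hU
  set qs := U.map (fun c => (l.idxOf c, c)) with hqs
  set ps := (pyLowerAlphabet.filter (fun c => l.count c == 1)).map (fun c => (l.idxOf c, c)) with hps
  have hmem : ∀ q, q ∈ ps ↔ q ∈ qs := fun q => mem_ps_iff l hcov q
  have hpw : qs.Pairwise (fun a b => a.1 < b.1) := U_pairwise l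
  have hhead : qs.head? = U.head?.map (fun c => (l.idxOf c, c)) := by rw [hqs, List.head?_map]
  have hlastq : qs.getLast? = U.getLast?.map (fun c => (l.idxOf c, c)) := by rw [hqs, List.getLast?_map]
  have hfirst : ps.foldl (List.argAux fun b c => b.1 < c.1) none = qs.head? := by
    cases hq : qs.head? with
    | none =>
      have hqnil : qs = [] := List.head?_eq_none_iff.mp hq
      have hpnil : ps = [] := List.eq_nil_iff_forall_not_mem.mpr (fun q hqp => by
        have hx := (hmem q).mp hqp; rw [hqnil] at hx; cases hx)
      rw [hpnil]; rfl
    | some h =>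
      have hAeq : ps.foldl (List.argAux fun b c => b.1 < c.1) none = List.argmin Prod.fst ps := rfl
      rw [hAeq]
      cases hm : List.argmin Prod.fst ps with
      | none =>
        have hpnil : ps = [] := List.argmin_eq_none.mp hm
        have hhqs : h ∈ qs := List.mem_of_mem_head? hq
        have := (hmem h).mpr hhqs
        rw [hpnil] at this; cases this
      | some m =>
        have hmmem : m ∈ ps := List.argmin_mem (by rw [hm]; rfl)
        have hmqs : m ∈ qs := (hmem m).mp hmmem
        have hhqs : h ∈ qs := List.mem_of_mem_head? hq
        have hhps : h ∈ ps := (hmem h).mpr hhqs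
        have h1 : m.1 ≤ h.1 := List.le_of_mem_argmin hhps (by rw [hm]; rfl)
        have h2 : h.1 ≤ m.1 := head_min qs hpw h hq m hmqs
        rw [eq_of_mem_of_key_eq qs hpw m h hmqs hhqs (le_antisymm h1 h2)]
  have hlast : ps.foldl (List.argAux fun b c => c.1 < b.1) none = qs.getLast? := by
    cases hq : qs.getLast? with
    | none =>
      have hqnil : qs = [] := List.getLast?_eq_none_iff.mp hq
      have hpnil : ps = [] := List.eq_nil_iff_forall_not_mem.mpr (fun q hqp => by
        have hx := (hmem q).mp hqp; rw [hqnil] at hx; cases hx)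
      rw [hpnil]; rfl
    | some g =>
      have hAeq : ps.foldl (List.argAux fun b c => c.1 < b.1) none = List.argmax Prod.fst ps := rfl
      rw [hAeq]
      cases hm : List.argmax Prod.fst ps with
      | none =>
        have hpnil : ps = [] := List.argmax_eq_none.mp hm
        have hgqs : g ∈ qs := List.mem_of_getLast? hq
        have := (hmem g).mpr hgqs
        rw [hpnil] at this; cases this
      | some m =>
        have hmmem : m ∈ ps := List.argmax_mem (by rw [hm]; rfl)
        have hmqs : m ∈ qs := (hmem m).mp hmmem
        have hgqs : g ∈ qs := List.mem_of_getLast? hq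
        have hgps : g ∈ ps := (hmem g).mpr hgqs
        have h1 : g.1 ≤ m.1 := List.le_of_mem_argmax hgps (by rw [hm]; rfl)
        have h2 : m.1 ≤ g.1 := last_max qs hpw g hq m hmqs
        rw [eq_of_mem_of_key_eq qs hpw m g hmqs hgqs (le_antisymm h2 h1)]
  rw [hfirst, hlast, hhead, hlastq]
  cases U.head? <;> cases U.getLast? <;> simp

-- ===== VERDICT (by name: the statement is the Claim_ definition above) =====
theorem get_first_last_unique_chars_spec : Claim_equal_get_first_last_unique_chars := by
  intro s hdom
  unfold Spec_get_first_last_unique_chars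
  exact get_first_last_unique_chars_eq s hdom
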